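-- pv_equiv track=rewrite | github.com/twbeatles/korea-assembly-cc | ui/main_window_persistence.py | _rtf_encode
-- ===== SOURCE A (Python) =====
-- def _rtf_encode(text: str) -> str:
--         """유니코드 문자를 RTF 형식으로 인코딩 (특수문자 이스케이프)"""
--         result = []
--         for char in text:
--             if char == "\\":
--                 result.append("\\\\")
--             elif char == "{":
--                 result.append("\\{")
--             elif char == "}":
--                 result.append("\\}")
--             else:
--                 result.append(char)
--         return "".join(result)
-- ===== SOURCE B (Python) =====
-- def _rtf_encode(text: str) -> str:
--     # backslash first so the escapes we introduce are not doubled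
--     return text.replace("\\", "\\\\").replace("{", "\\{").replace("}", "\\}")
-- ===== Notes on version B (the rewrite author's own statement) =====
-- stated objective: idiomatic
-- what changed: Replaces the explicit per-character accumulation loop with three chained str.replace calls (backslash first so the escapes it introduces are not doubled), letting the library do the scanning.
import Mathlib
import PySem

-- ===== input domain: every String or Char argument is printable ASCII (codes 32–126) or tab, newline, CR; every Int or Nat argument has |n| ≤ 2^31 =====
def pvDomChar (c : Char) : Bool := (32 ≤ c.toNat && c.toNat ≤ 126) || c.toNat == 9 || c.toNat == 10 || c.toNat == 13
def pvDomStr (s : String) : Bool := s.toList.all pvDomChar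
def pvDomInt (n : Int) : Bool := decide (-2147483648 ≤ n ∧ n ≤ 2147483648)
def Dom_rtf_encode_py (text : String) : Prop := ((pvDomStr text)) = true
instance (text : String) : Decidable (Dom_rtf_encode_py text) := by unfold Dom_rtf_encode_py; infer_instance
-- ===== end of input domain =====

-- B replaces A's per-character accumulation loop with three chained str.replace calls
-- (backslash first); equivalence of the two encodings is proved for every string.

-- ===== PORT A =====
-- A: loop over the characters, append the escape (or the character) to a list, join with "".
def rtf_encode_py (text : String) : String :=
  let result : List String :=
    text.toList.foldl (fun acc char =>
      if char = '\\' then acc ++ ["\\\\"]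
      else if char = '{' then acc ++ ["\\{"]
      else if char = '}' then acc ++ ["\\}"]
      else acc ++ [String.ofList [char]]) []
  PySem.Str.join "" result

-- ===== PORT B =====
-- B: text.replace("\\", "\\\\").replace("{", "\\{").replace("}", "\\}")
def rtf_encode_py_alt (text : String) : String :=
  PySem.Str.replace (PySem.Str.replace (PySem.Str.replace text "\\" "\\\\") "{" "\\{") "}" "\\}"

-- ===== PRECONDITION & SPEC =====
def Spec_rtf_encode_py (text : String) (out : String) : Prop := out = rtf_encode_py_alt text
instance (text : String) (out : String) : Decidable (Spec_rtf_encode_py text out) := by unfold Spec_rtf_encode_py; infer_instance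

-- ===== CLAIM (what is proved, stated in full; the proofs are below) =====
def Claim_equal_rtf_encode_py : Prop := ∀ (text : String), Dom_rtf_encode_py text → Spec_rtf_encode_py text (rtf_encode_py text)

-- ===== LEMMAS AND PROOFS =====

-- the per-character escape, as a list of chars
def pvEsc (c : Char) : List Char :=
  if c = '\\' then ['\\', '\\']
  else if c = '{' then ['\\', '{']
  else if c = '}' then ['\\', '}']
  else [c]

-- A's foldl builds the map of the per-character escape strings
theorem pvFoldl_append (l : List Char) (f : Char → String) (a : List String) :
    l.foldl (fun acc c => acc ++ [f c]) a = a ++ l.map f := by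
  induction l generalizing a with
  | nil => simp
  | cons c t ih => simp [List.foldl, ih, List.append_assoc]

-- replace with a single-char pattern is a flatMap substitution
theorem pvReplaceGo_single (o : Char) (new : List Char) (l acc : List Char) (fuel : Nat)
    (h : l.length ≤ fuel) :
    PySem.Chars.replace.go [o] new fuel l acc =
      acc.reverse ++ l.flatMap (fun c => if c = o then new else [c]) := by
  induction l generalizing fuel acc with
  | nil => cases fuel <;> simp [PySem.Chars.replace.go]
  | cons c t ih =>
    cases fuel with
    | zero => simp at h
    | succ n =>
      simp only [List.length_cons, Nat.succ_le_succ_iff] at h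
      by_cases hc : c = o
      · subst hc
        simp [PySem.Chars.replace.go, List.isPrefixOf, ih _ _ h, List.append_assoc]
      · have : ([o].isPrefixOf (c :: t)) = false := by
          simp [List.isPrefixOf]
          exact fun he => absurd he.symm hc
        simp [PySem.Chars.replace.go, this, ih _ _ h, hc, List.append_assoc]

theorem pvReplace_single (o : Char) (new : List Char) (l : List Char) :
    PySem.Chars.replace l [o] new = l.flatMap (fun c => if c = o then new else [c]) := by
  simp [PySem.Chars.replace, pvReplaceGo_single o new l [] l.length (le_refl _)]

theorem pvIntercalate_nil_flatten (xss : List (List Char)) :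
    ([] : List Char).intercalate xss = xss.flatten := by
  induction xss with
  | nil => simp [List.intercalate]
  | cons x t ih =>
    cases t with
    | nil => simp [List.intercalate]
    | cons y u =>
      simp [List.intercalate, List.intersperse] at ih ⊢
      simpa [List.intercalate] using ih

-- A computes the flatMap of pvEsc
def pvEscStr (c : Char) : String := String.ofList (pvEsc c)

theorem pvA_eq (text : String) :
    rtf_encode_py text = String.ofList (text.toList.flatMap pvEsc) := by
  unfold rtf_encode_py
  have hlam : (fun (acc : List String) (char : Char) =>
      if char = '\\' then acc ++ ["\\\\"]
      else if char = '{' then acc ++ ["\\{"]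
      else if char = '}' then acc ++ ["\\}"]
      else acc ++ [String.ofList [char]]) = (fun acc c => acc ++ [pvEscStr c]) := by
    funext acc c
    simp only [pvEscStr, pvEsc]
    split_ifs <;> rfl
  rw [hlam, pvFoldl_append]
  simp only [PySem.Str.join, PySem.Chars.join, List.nil_append]
  congr 1
  have h0 : "".toList = ([] : List Char) := rfl
  rw [h0, pvIntercalate_nil_flatten, List.map_map, List.flatMap]
  congr 1
  apply List.map_congr_left
  intro c _
  simp [Function.comp, pvEscStr]

-- B also computes the flatMap of pvEsc
theorem pvB_eq (text : String) :
    rtf_encode_py_alt text = String.ofList (text.toList.flatMap pvEsc) := by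
  unfold rtf_encode_py_alt
  simp only [PySem.Str.replace, String.toList_ofList]
  have h1 : ("\\".toList) = ['\\'] := by decide
  have h2 : ("{".toList) = ['{'] := by decide
  have h3 : ("}".toList) = ['}'] := by decide
  rw [h1, h2, h3]
  show String.ofList (PySem.Chars.replace (PySem.Chars.replace (PySem.Chars.replace text.toList ['\\'] "\\\\".toList) ['{'] "\\{".toList) ['}'] "\\}".toList) = _
  rw [pvReplace_single, pvReplace_single, pvReplace_single,
    List.flatMap_assoc, List.flatMap_assoc]
  congr 1
  apply List.flatMap_congr
  intro c _
  by_cases e1 : c = '\\' <;> by_cases e2 : c = '{' <;> by_cases e3 : c = '}' <;>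
    simp_all [pvEsc]

-- ===== VERDICT (by name: the statement is the Claim_ definition above) =====
theorem rtf_encode_py_spec : Claim_equal_rtf_encode_py := by
  intro text _
  unfold Spec_rtf_encode_py
  rw [pvA_eq, pvB_eq]
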